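-- pv_equiv track=rewrite | github.com/jahongir1511/8.10dars | 8.10dars/main.py | repeat_sum
-- ===== SOURCE A (Python) =====
-- def repeat_sum(lists):
--     num_count = {}
--     for sublist in lists:
--         seen_numbers = set()
--         for num in sublist:
--             if num in seen_numbers:
--                 continue
--             if num in num_count:
--                 num_count[num] += 1
--             else:
--                 num_count[num] = 1
--             seen_numbers.add(num)
--
--     result_sum = 0
--     for num, count in num_count.items():
--         if count >= 2:
--             result_sum += num
--
--     return result_sum
-- ===== SOURCE B (Python) =====
-- def repeat_sum(lists):
--     # sort all per-sublist-distinct occurrences, then scan runs: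
--     # a value appears in >= 2 sublists iff its run has length >= 2
--     occ = sorted(x for sub in lists for x in set(sub))
--     total = 0
--     i, n = 0, len(occ)
--     while i < n:
--         j = i + 1
--         while j < n and occ[j] == occ[i]:
--             j += 1
--         if j - i >= 2:
--             total += occ[i]
--         i = j
--     return total
-- ===== Notes on version B (the rewrite author's own statement) =====
-- stated objective: alternative
-- what changed: Replaces A's count-dictionary plus final count>=2 filtering pass with sort-then-scan: all per-sublist-distinct occurrences are sorted and adjacent runs of length >= 2 contribute their value once.
import Mathlib
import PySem

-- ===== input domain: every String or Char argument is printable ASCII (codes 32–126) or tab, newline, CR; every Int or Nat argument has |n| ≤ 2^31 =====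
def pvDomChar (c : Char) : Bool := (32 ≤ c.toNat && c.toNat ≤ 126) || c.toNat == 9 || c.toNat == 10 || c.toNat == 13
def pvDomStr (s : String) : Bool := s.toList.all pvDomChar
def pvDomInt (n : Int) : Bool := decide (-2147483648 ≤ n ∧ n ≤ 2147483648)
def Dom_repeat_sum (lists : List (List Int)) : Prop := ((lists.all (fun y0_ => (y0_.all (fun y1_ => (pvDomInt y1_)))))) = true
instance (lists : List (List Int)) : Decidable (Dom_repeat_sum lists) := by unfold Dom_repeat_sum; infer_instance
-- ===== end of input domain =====

-- B replaces A's count dictionary and final count≥2 filtering pass with sort-then-scan: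
-- sort all per-sublist-distinct occurrences and add each value whose run has length ≥ 2.

-- ===== PORT A =====
-- inner loop body of A: per-sublist dedup via `seen_numbers`, counting in `num_count`
def rsInnerA (st : PySem.Dict Int Int × PySem.Set Int) (num : Int) :
    PySem.Dict Int Int × PySem.Set Int :=
  if st.2.contains num then st
  else if st.1.contains num then (st.1.modify num 0 (· + 1), PySem.Set.add st.2 num)
  else (st.1.insert num 1, PySem.Set.add st.2 num)

def repeat_sum (lists : List (List Int)) : Int :=
  let num_count : PySem.Dict Int Int :=
    lists.foldl (fun d sublist => (sublist.foldl rsInnerA (d, PySem.Set.empty)).1)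
      PySem.Dict.empty
  num_count.items.foldl (fun acc p => if 2 ≤ p.2 then acc + p.1 else acc) 0

-- ===== PORT B =====
-- inner while loop of B: advance past the elements equal to the run's value
def rsSkip (v : Int) : List Int → List Int
  | [] => []
  | x :: xs => if x = v then rsSkip v xs else x :: xs

lemma rsSkip_length_le (v : Int) (l : List Int) : (rsSkip v l).length ≤ l.length := by
  induction l with
  | nil => simp [rsSkip]
  | cons x xs ih =>
    simp only [rsSkip]
    split_ifs with h
    · exact le_trans ih (by simp)
    · simp

-- outer while loop of B: one recursive step per run of the sorted list
def rsScan : List Int → Int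
  | [] => 0
  | [_] => 0
  | x :: y :: ys => if y = x then x + rsScan (rsSkip x ys) else rsScan (y :: ys)
termination_by l => l.length
decreasing_by
  · simpa using Nat.lt_succ_of_le (le_trans (rsSkip_length_le x ys) (Nat.le_succ _))
  · simp

def repeat_sum_alt (lists : List (List Int)) : Int :=
  let occ := PySem.List.sorted (lists.flatMap (fun sub => PySem.Set.ofList sub)) (fun x => x) false
  rsScan occ

-- ===== PRECONDITION & SPEC =====
def Spec_repeat_sum (lists : List (List Int)) (out : Int) : Prop := out = repeat_sum_alt lists
instance (lists : List (List Int)) (out : Int) : Decidable (Spec_repeat_sum lists out) := by unfold Spec_repeat_sum; infer_instance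

-- ===== CLAIM =====
def Claim_equal_repeat_sum : Prop := ∀ (lists : List (List Int)), Dom_repeat_sum lists → Spec_repeat_sum lists (repeat_sum lists)

-- ===== LEMMAS AND PROOFS =====

-- the common value: sum of the distinct occurrences appearing at least twice in occ
def rsM (occ : List Int) : Int :=
  ((PySem.Set.ofList occ).filter (fun k => decide (2 ≤ occ.count k))).sum

-- A's dict-update step, on an element already deduplicated
def rsStepA (d : PySem.Dict Int Int) (num : Int) : PySem.Dict Int Int :=
  if d.contains num then d.modify num 0 (· + 1) else d.insert num 1

-- the elements of l, in order, that survive A's `seen_numbers` guard starting from `seen`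
def rsNew (seen : PySem.Set Int) : List Int → List Int
  | [] => []
  | x :: xs => if x ∈ seen then rsNew seen xs
               else x :: rsNew (PySem.Set.add seen x) xs

lemma rsInnerA_eq_rsNew (l : List Int) (d : PySem.Dict Int Int) (seen : PySem.Set Int) :
    (l.foldl rsInnerA (d, seen)).1 = (rsNew seen l).foldl rsStepA d := by
  induction l generalizing d seen with
  | nil => rfl
  | cons x xs ih =>
    simp only [List.foldl_cons, rsInnerA, rsNew]
    by_cases hx : x ∈ seen
    · simp [hx, ih]
    · by_cases hd : d.contains x <;> simp [hx, hd, ih, rsStepA]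

lemma rsNew_update (l : List Int) (seen : PySem.Set Int) :
    seen ++ rsNew seen l = PySem.Set.update seen l := by
  induction l generalizing seen with
  | nil => simp [PySem.Set.update, rsNew]
  | cons x xs ih =>
    simp only [rsNew, PySem.Set.update, List.foldl_cons]
    by_cases hx : x ∈ seen
    · rw [if_pos hx, PySem.Set.add_of_mem hx]
      simpa [PySem.Set.update] using ih seen
    · rw [if_neg hx]
      have h2 : seen ++ x :: rsNew (PySem.Set.add seen x) xs
          = PySem.Set.add seen x ++ rsNew (PySem.Set.add seen x) xs := by
        rw [PySem.Set.add_of_not_mem hx]; simp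
      rw [h2]
      simpa [PySem.Set.update] using ih (PySem.Set.add seen x)

lemma rsNew_empty_eq_ofList (l : List Int) :
    rsNew PySem.Set.empty l = PySem.Set.ofList l := by
  have h := rsNew_update l PySem.Set.empty
  simpa [PySem.Set.empty, PySem.Set.ofList_eq_foldl, PySem.Set.update] using h

-- A's step is the Counter step
lemma rsStepA_eq_modify (d : PySem.Dict Int Int) (num : Int) :
    rsStepA d num = d.modify num 0 (· + 1) := by
  unfold rsStepA
  by_cases hc : d.contains num = true
  · simp [hc]
  · have hcf : d.contains num = false := by simpa using hc
    rw [if_neg (by simp [hcf]), PySem.Dict.modify,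
      PySem.Dict.getD_of_not_contains d 0 hcf]
    norm_num

-- A's final loop sums the keys whose count is ≥ 2
lemma rsFinal_foldl (l : List (Int × Int)) (a : Int) :
    l.foldl (fun acc p => if 2 ≤ p.2 then acc + p.1 else acc) a
      = a + ((l.filter (fun p => 2 ≤ p.2)).map (·.1)).sum := by
  induction l generalizing a with
  | nil => simp
  | cons p t ih =>
    by_cases hp : 2 ≤ p.2
    · simp [hp, ih]; ring
    · simp [hp, ih]

-- A computes rsM of the flattened per-sublist-distinct occurrences
lemma repeat_sum_eq_rsM (lists : List (List Int)) :
    repeat_sum lists = rsM (lists.flatMap (fun sub => PySem.Set.ofList sub)) := by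
  unfold repeat_sum
  have hstepA : rsStepA = fun d num => d.modify num 0 (· + 1) :=
    funext fun d => funext fun num => rsStepA_eq_modify d num
  have hstep : (fun (d : PySem.Dict Int Int) (sublist : List Int) =>
        (sublist.foldl rsInnerA (d, PySem.Set.empty)).1)
      = fun d sublist => (PySem.Set.ofList sublist).foldl
          (fun d x => d.modify x 0 (· + 1)) d := by
    funext d sublist
    rw [rsInnerA_eq_rsNew, rsNew_empty_eq_ofList, hstepA]
  rw [hstep, ← List.foldl_flatMap, ← PySem.Dict.counter_eq_foldl]
  show (PySem.Dict.counter (List.flatMap PySem.Set.ofList lists)).items.foldl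
      (fun acc p => if 2 ≤ p.2 then acc + p.1 else acc) 0
    = rsM (lists.flatMap (fun sub => PySem.Set.ofList sub))
  rw [PySem.Dict.items_counter, rsFinal_foldl, zero_add, rsM]
  rw [List.filter_map, List.map_map]
  simp only [Function.comp_def]
  rw [List.map_id']
  refine congrArg List.sum (List.filter_congr fun v _ => ?_)
  norm_num

lemma discard_of_not_mem {s : PySem.Set Int} {x : Int} (h : x ∉ s) :
    PySem.Set.discard s x = s := by
  simp only [PySem.Set.discard]
  refine List.filter_eq_self.mpr (fun y hy => ?_)
  have hne : y ≠ x := fun he => h (he ▸ hy)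
  simp [hne]

-- Set.ofList of a nonempty run followed by an x-free tail
lemma rsOfList_run (k : Nat) (x : Int) (rest : List Int) (hx : x ∉ rest) :
    PySem.Set.ofList (List.replicate (k + 1) x ++ rest) = x :: PySem.Set.ofList rest := by
  induction k with
  | zero =>
    rw [List.replicate_one, List.singleton_append, PySem.Set.ofList_cons,
      discard_of_not_mem (by simpa [PySem.Set.mem_ofList] using hx)]
  | succ n ih =>
    have : List.replicate (n + 2) x ++ rest = x :: (List.replicate (n + 1) x ++ rest) := by
      simp [List.replicate_succ]
    rw [this, PySem.Set.ofList_cons, ih]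
    have hxr : x ∉ PySem.Set.ofList rest := by simpa [PySem.Set.mem_ofList] using hx
    have h1 : PySem.Set.discard (x :: PySem.Set.ofList rest) x
        = PySem.Set.discard (PySem.Set.ofList rest) x := by
      simp [PySem.Set.discard]
    rw [h1, discard_of_not_mem hxr]

-- the run decomposition of a sorted list
lemma rsSkip_decomp (x : Int) (l : List Int) (hall : ∀ a ∈ l, x ≤ a)
    (hp : l.Pairwise (· ≤ ·)) :
    ∃ k, l = List.replicate k x ++ rsSkip x l ∧ x ∉ rsSkip x l := by
  induction l with
  | nil => exact ⟨0, rfl, by simp [rsSkip]⟩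
  | cons a as ih =>
    rw [List.pairwise_cons] at hp
    by_cases ha : a = x
    · subst ha
      obtain ⟨k, h1, h2⟩ := ih (fun b hb => hp.1 b hb) hp.2
      exact ⟨k + 1, by simp [rsSkip, List.replicate_succ, ← h1], by simpa [rsSkip] using h2⟩
    · refine ⟨0, by simp [rsSkip, ha], ?_⟩
      simp only [rsSkip, if_neg ha]
      have hxa : x < a := lt_of_le_of_ne (hall a (by simp)) (Ne.symm ha)
      intro hmem
      rcases List.mem_cons.mp hmem with h | h
      · exact ha h.symm
      · exact absurd (hp.1 x h) (not_le.mpr hxa)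

-- one run of rsM, peeled off
lemma rsM_cons (x : Int) (xs : List Int) (hp : (x :: xs).Pairwise (· ≤ ·)) :
    rsM (x :: xs) = (if x ∈ xs then x else 0) + rsM (rsSkip x xs) := by
  rw [List.pairwise_cons] at hp
  obtain ⟨k, hdec, hnm⟩ := rsSkip_decomp x xs hp.1 hp.2
  set rest := rsSkip x xs with hrest
  have hfull : x :: xs = List.replicate (k + 1) x ++ rest := by
    simp [List.replicate_succ, hdec]
  have hcx : (x :: xs).count x = k + 1 := by
    rw [hfull, List.count_append]
    simp [List.count_eq_zero_of_not_mem hnm]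
  have hcv : ∀ v, v ≠ x → (x :: xs).count v = rest.count v := by
    intro v hv
    rw [hfull, List.count_append]
    simp [List.count_replicate, Ne.symm hv]
  have hmem : x ∈ xs ↔ 1 ≤ k := by
    rw [hdec]
    simp only [List.mem_append, List.mem_replicate]
    constructor
    · rintro (⟨hk, _⟩ | h)
      · omega
      · exact absurd h hnm
    · intro hk; exact Or.inl ⟨by omega, trivial⟩
  rw [rsM, hfull, rsOfList_run k x rest hnm, List.filter_cons]
  have hfiltr : (PySem.Set.ofList rest).filter
        (fun v => decide (2 ≤ (List.replicate (k + 1) x ++ rest).count v))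
      = (PySem.Set.ofList rest).filter (fun v => decide (2 ≤ rest.count v)) := by
    refine List.filter_congr (fun v hv => ?_)
    have hvr : v ∈ rest := (PySem.Set.mem_ofList _ _).mp hv
    have hvx : v ≠ x := fun h => hnm (h ▸ hvr)
    rw [← hfull, hcv v hvx]
  by_cases hk : 1 ≤ k
  · have : (2 ≤ (List.replicate (k + 1) x ++ rest).count x) := by
      rw [← hfull, hcx]; omega
    rw [if_pos (by simpa using this), hfiltr]
    simp [hmem.mpr hk, rsM]
  · have : ¬ (2 ≤ (List.replicate (k + 1) x ++ rest).count x) := by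
      rw [← hfull, hcx]; omega
    rw [if_neg (by simpa using this), hfiltr]
    have : x ∉ xs := fun h => hk (hmem.mp h)
    simp [this, rsM]

lemma rsScan_eq_rsM (s : List Int) (hp : s.Pairwise (· ≤ ·)) : rsScan s = rsM s := by
  induction hn : s.length using Nat.strong_induction_on generalizing s with
  | _ n ih =>
  match s, hp with
  | [], _ => simp [rsScan, rsM, PySem.Set.ofList]
  | [x], hp =>
    rw [rsM_cons x [] hp]
    simp [rsScan, rsSkip, rsM, PySem.Set.ofList]
  | x :: y :: ys, hp =>
    subst hn
    rw [List.pairwise_cons] at hp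
    obtain ⟨k, hdec, hnm⟩ := rsSkip_decomp x (y :: ys) hp.1 hp.2
    have hrestp : (rsSkip x (y :: ys)).Pairwise (· ≤ ·) := by
      refine List.Pairwise.sublist ?_ hp.2
      conv_rhs => rw [hdec]
      exact List.sublist_append_right _ _
    have hrlen : (rsSkip x (y :: ys)).length ≤ (y :: ys).length := rsSkip_length_le _ _
    rw [rsM_cons x (y :: ys) (List.pairwise_cons.mpr hp)]
    by_cases hyx : y = x
    · subst hyx
      have hmem : y ∈ y :: ys := by simp
      have hskip : rsSkip y (y :: ys) = rsSkip y ys := by simp [rsSkip]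
      rw [show rsScan (y :: y :: ys) = y + rsScan (rsSkip y ys) from by
        simp [rsScan]]
      rw [if_pos hmem, hskip]
      congr 1
      refine ih (rsSkip y ys).length ?_ _ (by rw [← hskip]; exact hrestp) rfl
      have := rsSkip_length_le y ys
      simp only [List.length_cons]; omega
    · have hk0 : k = 0 := by
        rcases Nat.eq_zero_or_pos k with h | h
        · exact h
        · exfalso
          have : (y :: ys).headI = x := by
            rw [hdec]
            cases k with
            | zero => omega
            | succ m => simp [List.replicate_succ]
          simp at this; exact hyx this
      have hskip : rsSkip x (y :: ys) = y :: ys := by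
        have := hdec; rw [hk0] at this; simpa using this.symm
      have hxmem : x ∉ y :: ys := by rw [← hskip]; exact hnm
      rw [show rsScan (x :: y :: ys) = rsScan (y :: ys) from by simp [rsScan, hyx]]
      rw [if_neg hxmem, hskip, zero_add]
      exact ih (y :: ys).length (by simp) _ hp.2 rfl

lemma rsM_perm {s t : List Int} (h : s.Perm t) : rsM s = rsM t := by
  have hcnt : (fun k => decide (2 ≤ s.count k)) = fun k => decide (2 ≤ t.count k) := by
    funext k; rw [h.count_eq]
  unfold rsM
  rw [hcnt]
  refine List.Perm.sum_eq ?_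
  rw [List.perm_ext_iff_of_nodup (List.Nodup.filter _ (PySem.Set.nodup_ofList _))
    (List.Nodup.filter _ (PySem.Set.nodup_ofList _))]
  intro v
  simp only [List.mem_filter, PySem.Set.mem_ofList, h.mem_iff]

-- ===== VERDICT (by name: the statement is the Claim_ definition above) =====
theorem repeat_sum_spec : Claim_equal_repeat_sum := by
  intro lists _
  unfold Spec_repeat_sum repeat_sum_alt
  rw [repeat_sum_eq_rsM]
  show rsM (lists.flatMap (fun sub => PySem.Set.ofList sub))
    = rsScan (PySem.List.sorted (lists.flatMap (fun sub => PySem.Set.ofList sub))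
        (fun x => x) false)
  rw [rsScan_eq_rsM _ (by
    simpa using PySem.List.sorted_pairwise
      (lists.flatMap (fun sub => PySem.Set.ofList sub)) (fun x : Int => x))]
  exact (rsM_perm (PySem.List.sorted_perm _ _ _)).symm
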